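-- pv_equiv track=rewrite | github.com/facagovi/trabalhoTr1 | decode_enlance.py | Ddet32
-- ===== SOURCE A (Python) =====
-- def Ddet32(quadro):
--     crc = [1, 0, 0, 0, 0, 0, 1, 0, 0, 1, 1, 0, 0, 0, 0, 0, 1, 0, 0, 0, 1, 1, 1, 0, 1, 1, 0, 1, 1, 0, 1, 1, 1]
--     dados_trabalho = list(quadro)
--
--     for i in range(len(dados_trabalho) - 32):
--         if dados_trabalho[i] == 1:
--             for j in range(len(crc)):
--                 dados_trabalho[i + j] ^= crc[j]
--     resto = dados_trabalho[-32:]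
--     if 1 not in resto:
--         return True, quadro[:-32]
--     else:
--         return False, []
-- ===== SOURCE B (Python) =====
-- def Ddet32(quadro):
--     # CRC register: fold the frame's leading bits into a 32-bit pending-xor
--     # register instead of XOR-ing the divisor into a mutable copy of the frame.
--     # TAIL has bit t = crc[t+1] of A's 33-bit divisor (crc[0] is consumed by the test).
--     TAIL = 0b11101101101110001000001100100000
--     n = len(quadro)
--     payload = quadro[:-32]
--     reg = 0
--     for x in payload:
--         cur = x ^ (reg & 1)
--         reg >>= 1
--         if cur == 1:
--             reg ^= TAIL
--     tail = quadro[-32:]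
--     if all(x ^ ((reg >> t) & 1) != 1 for t, x in enumerate(tail)):
--         return True, payload
--     else:
--         return False, []
-- ===== Notes on version B (the rewrite author's own statement) =====
-- stated objective: alternative
-- what changed: A XORs the 33-bit divisor into a mutable copy of the whole frame (nested loops, list buffer); B folds the frame once into a single 32-bit pending-xor CRC register (int shifts/xors) and tests the last 32 positions against the register bits.
import Mathlib
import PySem

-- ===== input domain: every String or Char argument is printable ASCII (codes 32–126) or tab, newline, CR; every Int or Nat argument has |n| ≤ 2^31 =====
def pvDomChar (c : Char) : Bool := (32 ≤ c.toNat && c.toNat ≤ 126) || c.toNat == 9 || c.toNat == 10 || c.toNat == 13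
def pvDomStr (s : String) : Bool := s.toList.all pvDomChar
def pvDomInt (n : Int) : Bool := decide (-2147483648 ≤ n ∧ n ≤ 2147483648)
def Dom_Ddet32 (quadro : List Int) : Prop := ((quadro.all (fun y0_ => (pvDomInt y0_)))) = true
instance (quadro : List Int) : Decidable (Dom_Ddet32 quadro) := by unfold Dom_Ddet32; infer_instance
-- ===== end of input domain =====

-- B replaces A's in-place XOR long division over a mutable copy of the frame by a single
-- left-to-right fold keeping one 32-bit pending-xor register (objective: alternative/idiomatic CRC register form).

-- ===== PORT A =====
def pvCrc : List Int :=
  [1, 0, 0, 0, 0, 0, 1, 0, 0, 1, 1, 0, 0, 0, 0, 0, 1, 0, 0, 0, 1, 1, 1, 0, 1, 1, 0, 1, 1, 0, 1, 1, 1]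

-- inner 'for j in range(len(crc)): dados[i+j] ^= crc[j]' (all indices are in range when the loop runs)
def pvInner (d : List Int) (i : Int) : List Int :=
  (PySem.List.pyRange 0 (PySem.List.len pvCrc) 1).foldl
    (fun d2 j =>
      PySem.List.pySetD d2 (i + j)
        (PySem.Int.bxor (PySem.List.pyGetD d2 (i + j) 0) (PySem.List.pyGetD pvCrc j 0))) d

-- outer loop body: 'if dados[i] == 1: <inner loop>'
def pvOuter (d : List Int) (i : Int) : List Int :=
  if PySem.List.pyGetD d i 0 = 1 then pvInner d i else d

def Ddet32 (quadro : List Int) : Bool × List Int :=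
  let dados := quadro
  let dados := (PySem.List.pyRange 0 (PySem.List.len dados - 32) 1).foldl pvOuter dados
  let resto := PySem.List.slice dados (some (-32)) none
  if ¬ (1 ∈ resto) then (true, PySem.List.slice quadro none (some (-32)))
  else (false, [])

-- ===== PORT B =====
-- TAIL constant of Source B: bit t = crc[t+1]
def pvTail : Int := 3988292384

-- loop body of Source B's fold: shift the register, xor in the divisor tail when the quotient bit is 1
def pvStep (reg : Int) (x : Int) : Int :=
  let cur := PySem.Int.bxor x (PySem.Int.band reg 1)
  let reg := reg >>> (1 : Nat)
  if cur = 1 then PySem.Int.bxor reg pvTail else reg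

def Ddet32_alt (quadro : List Int) : Bool × List Int :=
  let payload := PySem.List.slice quadro none (some (-32))
  let reg := payload.foldl pvStep 0
  let tail := PySem.List.slice quadro (some (-32)) none
  -- 'all(x ^ ((reg >> t) & 1) != 1 for t, x in enumerate(tail))'; t ≥ 0, so .toNat is exact
  if (PySem.List.enumerate tail 0).all
      (fun tx => PySem.Int.bxor tx.2 (PySem.Int.band (reg >>> tx.1.toNat) 1) != 1)
  then (true, payload) else (false, [])

-- ===== PRECONDITION & SPEC =====
def Spec_Ddet32 (quadro : List Int) (out : Bool × List Int) : Prop := out = Ddet32_alt quadro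
instance (quadro : List Int) (out : Bool × List Int) : Decidable (Spec_Ddet32 quadro out) := by unfold Spec_Ddet32; infer_instance

-- ===== CLAIM (what is proved, stated in full; the proofs are below) =====
def Claim_equal_Ddet32 : Prop := ∀ (quadro : List Int), Dom_Ddet32 quadro → Spec_Ddet32 quadro (Ddet32 quadro)

-- ===== LEMMAS AND PROOFS =====

-- bit t of a machine word, as a Nat (0 or 1)
def pvBit (r t : Nat) : Nat := (r.testBit t).toNat

def pvTailN : Nat := 3988292384

theorem pv_and_one (s : Nat) : s &&& 1 = pvBit s 0 := by
  rcases Nat.mod_two_eq_zero_or_one s with h | h <;>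
    simp [pvBit, Nat.and_one_is_mod, Nat.testBit_zero, h]

theorem pv_band_one (s : Nat) : PySem.Int.band (s : Int) 1 = ((pvBit s 0 : Nat) : Int) := by
  have h : ((1 : Nat) : Int) = (1 : Int) := by norm_num
  rw [← h, PySem.Int.band_natCast, pv_and_one]

theorem pv_shift_cast (r k : Nat) : ((r : Int) >>> k) = ((r >>> k : Nat) : Int) := by
  exact_mod_cast Int.natCast_shiftRight r k

theorem pv_bit_shift (r t k : Nat) : pvBit (r >>> k) t = pvBit r (k + t) := by
  simp [pvBit, Nat.testBit_shiftRight]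

theorem pv_bit_xor (a b t : Nat) : pvBit (a ^^^ b) t = pvBit a t ^^^ pvBit b t := by
  simp only [pvBit, Nat.testBit_xor]
  cases a.testBit t <;> cases b.testBit t <;> rfl

theorem pv_bit_high {r t : Nat} (hr : r < 2 ^ 32) (ht : 32 ≤ t) : pvBit r t = 0 := by
  have : r < 2 ^ t := lt_of_lt_of_le hr (Nat.pow_le_pow_right (by norm_num) ht)
  simp [pvBit, Nat.testBit_lt_two_pow this]

theorem pv_bxor_neg (n a : Nat) :
    PySem.Int.bxor (-(n : Int) - 1) (a : Int) = -((n ^^^ a : Nat) : Int) - 1 := by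
  simp only [PySem.Int.bxor]
  rw [if_neg (by omega), if_pos (by positivity)]
  have h1 : (-(-(n : Int) - 1) - 1) = (n : Int) := by ring
  rw [h1]
  simp

theorem pv_bxor_bxor (x : Int) (a b : Nat) :
    PySem.Int.bxor (PySem.Int.bxor x (a : Int)) (b : Int) = PySem.Int.bxor x ((a ^^^ b : Nat) : Int) := by
  by_cases hx : 0 ≤ x
  · obtain ⟨n, rfl⟩ := Int.eq_ofNat_of_zero_le hx
    rw [PySem.Int.bxor_natCast, PySem.Int.bxor_natCast, PySem.Int.bxor_natCast, Nat.xor_assoc]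
  · obtain ⟨n, rfl⟩ : ∃ n : Nat, x = -(n : Int) - 1 := ⟨(-x - 1).toNat, by omega⟩
    rw [pv_bxor_neg, pv_bxor_neg, pv_bxor_neg, Nat.xor_assoc]

-- crc bridge: entry t+1 of pvCrc is bit t of the tail constant
theorem pv_crc_bit : ∀ t < 32, pvCrc.getD (t + 1) 0 = ((pvBit pvTailN t : Nat) : Int) := by decide

-- characterization of the inner loop (generalized over the loop bound J)
theorem pv_inner_aux (d : List Int) (m : Nat) (J : Nat) (hJ : J ≤ 33) (h : m + 33 ≤ d.length) :
    ((PySem.List.pyRange 0 (J : Int) 1).foldl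
        (fun d2 j =>
          PySem.List.pySetD d2 ((m : Int) + j)
            (PySem.Int.bxor (PySem.List.pyGetD d2 ((m : Int) + j) 0) (PySem.List.pyGetD pvCrc j 0))) d).length
      = d.length ∧
    ∀ k : Nat,
      ((PySem.List.pyRange 0 (J : Int) 1).foldl
        (fun d2 j =>
          PySem.List.pySetD d2 ((m : Int) + j)
            (PySem.Int.bxor (PySem.List.pyGetD d2 ((m : Int) + j) 0) (PySem.List.pyGetD pvCrc j 0))) d).getD k 0
      = if m ≤ k ∧ k < m + J then PySem.Int.bxor (d.getD k 0) (pvCrc.getD (k - m) 0) else d.getD k 0 := by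
  induction J with
  | zero =>
      rw [show ((0 : Nat) : Int) = 0 by norm_num, PySem.List.pyRange_one_eq_nil le_rfl]
      refine ⟨rfl, ?_⟩
      intro k
      have hc : ¬ (m ≤ k ∧ k < m + 0) := by omega
      rw [if_neg hc]
      rfl
  | succ J ih =>
      obtain ⟨ihlen, ihget⟩ := ih (by omega)
      rw [show ((J + 1 : Nat) : Int) = (J : Int) + 1 by push_cast; ring,
        PySem.List.pyRange_one_succ_right (Int.natCast_nonneg J), List.foldl_append,
        List.foldl_cons, List.foldl_nil]
      rw [show (m : Int) + (J : Int) = ((m + J : Nat) : Int) by push_cast; ring,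
        PySem.List.pyGetD_natCast, PySem.List.pyGetD_natCast, PySem.List.pySetD_natCast]
      set dJ := (PySem.List.pyRange 0 (J : Int) 1).foldl
        (fun d2 j =>
          PySem.List.pySetD d2 ((m : Int) + j)
            (PySem.Int.bxor (PySem.List.pyGetD d2 ((m : Int) + j) 0) (PySem.List.pyGetD pvCrc j 0))) d
        with hdJ
      have hv := ihget (m + J)
      rw [if_neg (by omega)] at hv
      rw [hv]
      refine ⟨by rw [List.length_set, ihlen], ?_⟩
      intro k
      by_cases hk : k = m + J
      · subst hk
        have hlt : m + J < dJ.length := by rw [ihlen]; omega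
        rw [List.getD_eq_getElem _ _ (by simpa using hlt), List.getElem_set_self,
          if_pos (by omega)]
        have e3 : m + J - m = J := by omega
        rw [e3]
      · rw [List.getD_eq_getElem?_getD, List.getElem?_set_ne (by omega),
          ← List.getD_eq_getElem?_getD, ihget k]
        by_cases hc : m ≤ k ∧ k < m + J
        · rw [if_pos hc, if_pos (by omega)]
        · rw [if_neg hc, if_neg (by omega)]

theorem pv_inner_char (d : List Int) (m : Nat) (h : m + 33 ≤ d.length) :
    (pvInner d (m : Int)).length = d.length ∧
    ∀ k : Nat, (pvInner d (m : Int)).getD k 0 =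
      if m ≤ k ∧ k < m + 33 then PySem.Int.bxor (d.getD k 0) (pvCrc.getD (k - m) 0) else d.getD k 0 := by
  have h33 : PySem.List.len pvCrc = ((33 : Nat) : Int) := by decide
  unfold pvInner
  rw [h33]
  exact pv_inner_aux d m 33 le_rfl h

-- the joint loop invariant: B's register holds exactly the pending xor bits of A's working buffer
theorem pv_outer_inv (q : List Int) (m : Nat) (hm : m ≤ q.length - 32) :
    ∃ r : Nat, r < 2 ^ 32 ∧ (q.take m).foldl pvStep 0 = (r : Int) ∧
      (((List.range m).map (fun k => ((k : Nat) : Int))).foldl pvOuter q).length = q.length ∧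
      ∀ t : Nat,
        (((List.range m).map (fun k => ((k : Nat) : Int))).foldl pvOuter q).getD (m + t) 0
          = PySem.Int.bxor (q.getD (m + t) 0) ((pvBit r t : Nat) : Int) := by
  induction m with
  | zero =>
      refine ⟨0, by norm_num, by simp, by simp, ?_⟩
      intro t
      simp [pvBit, Nat.zero_testBit, PySem.Int.bxor_zero]
  | succ m ih =>
      have hq33 : m + 33 ≤ q.length := by omega
      have hmlt : m < q.length := by omega
      obtain ⟨r, hr, hfold, hlen, hbits⟩ := ih (by omega)
      rw [List.range_succ, List.map_append, List.foldl_append, List.map_cons, List.map_nil,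
        List.foldl_cons, List.foldl_nil, List.take_add_one, List.getElem?_eq_getElem hmlt, Option.toList_some,
        List.foldl_append, List.foldl_cons, List.foldl_nil, hfold]
      have hgd : q.getD m 0 = q[m] := List.getD_eq_getElem q 0 hmlt
      have hdm := hbits 0
      rw [Nat.add_zero] at hdm
      have hcond : PySem.List.pyGetD
          (((List.range m).map (fun k => ((k : Nat) : Int))).foldl pvOuter q) ((m : Nat) : Int) 0
          = PySem.Int.bxor q[m] ((pvBit r 0 : Nat) : Int) := by
        rw [PySem.List.pyGetD_natCast, hdm, hgd]
      have hstep : pvStep (r : Int) q[m] =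
          if PySem.Int.bxor q[m] ((pvBit r 0 : Nat) : Int) = 1
          then PySem.Int.bxor ((r : Int) >>> (1 : Nat)) pvTail else (r : Int) >>> (1 : Nat) := by
        unfold pvStep
        rw [pv_band_one]
      have hshift : ((r : Int) >>> (1 : Nat)) = ((r >>> 1 : Nat) : Int) := pv_shift_cast r 1
      have hr1 : r >>> 1 < 2 ^ 32 := by
        rw [Nat.shiftRight_eq_div_pow]
        exact lt_of_le_of_lt (Nat.div_le_self _ _) hr
      have htl : pvTail = ((pvTailN : Nat) : Int) := by
        unfold pvTail pvTailN
        rw [Nat.cast_ofNat]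
      by_cases hcur : PySem.Int.bxor q[m] ((pvBit r 0 : Nat) : Int) = 1
      · -- quotient bit 1: A runs the inner xor loop, B xors the divisor tail into the register
        refine ⟨(r >>> 1) ^^^ pvTailN, Nat.xor_lt_two_pow hr1 (by norm_num [pvTailN]), ?_, ?_, ?_⟩
        · rw [hstep, if_pos hcur, hshift, htl, PySem.Int.bxor_natCast]
        · rw [pvOuter, hcond, if_pos hcur]
          exact (pv_inner_char _ m (by rw [hlen]; exact hq33)).1.trans hlen
        · intro t
          rw [pvOuter, hcond, if_pos hcur]
          obtain ⟨_, hchar⟩ := pv_inner_char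
            (((List.range m).map (fun k => ((k : Nat) : Int))).foldl pvOuter q) m
            (by rw [hlen]; exact hq33)
          have e1 : m + 1 + t = m + (1 + t) := by omega
          by_cases ht : t < 32
          · have hc := hchar (m + 1 + t)
            rw [if_pos (by omega)] at hc
            rw [hc, e1, hbits (1 + t)]
            have e2 : m + (1 + t) - m = t + 1 := by omega
            rw [e2, pv_crc_bit t ht, pv_bxor_bxor]
            have e4 : pvBit ((r >>> 1) ^^^ pvTailN) t = pvBit r (t + 1) ^^^ pvBit pvTailN t := by
              rw [pv_bit_xor, pv_bit_shift, Nat.add_comm 1 t]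
            rw [e4, Nat.add_comm 1 t]
          · have hc := hchar (m + 1 + t)
            rw [if_neg (by omega)] at hc
            rw [hc, e1, hbits (1 + t), pv_bit_high hr (by omega),
              pv_bit_high (Nat.xor_lt_two_pow hr1 (by norm_num [pvTailN])) (by omega)]
      · -- quotient bit 0: both sides only shift
        refine ⟨r >>> 1, hr1, ?_, ?_, ?_⟩
        · rw [hstep, if_neg hcur, hshift]
        · rw [pvOuter, hcond, if_neg hcur]
          exact hlen
        · intro t
          rw [pvOuter, hcond, if_neg hcur]
          have e1 : m + 1 + t = m + (1 + t) := by omega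
          rw [e1, hbits (1 + t)]
          have e4 : pvBit (r >>> 1) t = pvBit r (1 + t) := pv_bit_shift r t 1
          rw [e4]

theorem pv_main (quadro : List Int) : Ddet32 quadro = Ddet32_alt quadro := by
  obtain ⟨r, hr, hfold, hlen, hbits⟩ := pv_outer_inv quadro (quadro.length - 32) le_rfl
  simp only [Ddet32, Ddet32_alt, PySem.List.len_eq]
  have hAfold : (PySem.List.pyRange 0 ((quadro.length : Int) - 32) 1).foldl pvOuter quadro
      = ((List.range (quadro.length - 32)).map (fun k => ((k : Nat) : Int))).foldl pvOuter quadro := by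
    rw [PySem.List.pyRange_one]
    have e : (((quadro.length : Int) - 32) - 0).toNat = quadro.length - 32 := by omega
    rw [e]
    have ef : (fun k : Nat => (0 : Int) + (k : Int)) = (fun k : Nat => ((k : Nat) : Int)) := by
      funext k
      ring
    rw [ef]
  simp only [hAfold]
  set M := quadro.length - 32 with hM
  set d := ((List.range M).map (fun k => ((k : Nat) : Int))).foldl pvOuter quadro with hd
  have hs1 : PySem.List.slice quadro none (some (-32)) = quadro.take M :=
    PySem.List.slice_to_neg_ofNat quadro 32 (by norm_num)
  have hs2 : PySem.List.slice quadro (some (-32)) none = quadro.drop M :=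
    PySem.List.slice_from_neg_ofNat quadro 32 (by norm_num)
  have hs3 : PySem.List.slice d (some (-32)) none = d.drop M := by
    rw [PySem.List.slice_from_neg_ofNat d 32 (by norm_num),
      show d.length = quadro.length from hlen]
  simp only [hs1, hs2, hs3, hfold]
  have hlen2 : (d.drop M).length = (quadro.drop M).length := by
    rw [List.length_drop, List.length_drop, hlen]
  have hgetd : ∀ t : Nat, (d.drop M).getD t 0
      = PySem.Int.bxor ((quadro.drop M).getD t 0) ((pvBit r t : Nat) : Int) := by
    intro t
    have h1 : (d.drop M).getD t 0 = d.getD (M + t) 0 := by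
      rw [List.getD_eq_getElem?_getD, List.getElem?_drop, ← List.getD_eq_getElem?_getD]
    have h2 : (quadro.drop M).getD t 0 = quadro.getD (M + t) 0 := by
      rw [List.getD_eq_getElem?_getD, List.getElem?_drop, ← List.getD_eq_getElem?_getD]
    rw [h1, h2]
    exact hbits t
  have hmem : (1 ∈ d.drop M) ↔ ∃ t, t < (quadro.drop M).length ∧
      PySem.Int.bxor ((quadro.drop M).getD t 0) ((pvBit r t : Nat) : Int) = 1 := by
    rw [List.mem_iff_getElem]
    constructor
    · rintro ⟨t, ht, hv⟩
      exact ⟨t, hlen2 ▸ ht, by rw [← hgetd t, List.getD_eq_getElem _ _ ht]; exact hv⟩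
    · rintro ⟨t, ht, hv⟩
      have ht' : t < (d.drop M).length := by rw [hlen2]; exact ht
      exact ⟨t, ht', by rw [← List.getD_eq_getElem _ _ ht', hgetd t]; exact hv⟩
  have hband : ∀ t : Nat,
      PySem.Int.band (((r : Nat) : Int) >>> (((0 : Int) + (t : Int)).toNat)) 1
        = ((pvBit r t : Nat) : Int) := by
    intro t
    have e : ((0 : Int) + (t : Int)).toNat = t := by omega
    rw [e, pv_shift_cast, pv_band_one, pv_bit_shift, Nat.add_zero]
  have hall : ((PySem.List.enumerate (quadro.drop M) 0).all
      (fun tx => PySem.Int.bxor tx.2 (PySem.Int.band (((r : Nat) : Int) >>> tx.1.toNat) 1) != 1)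
      = true)
      ↔ ∀ t, t < (quadro.drop M).length →
        PySem.Int.bxor ((quadro.drop M).getD t 0) ((pvBit r t : Nat) : Int) ≠ 1 := by
    rw [List.all_eq_true]
    constructor
    · intro h t ht
      have hte : t < (PySem.List.enumerate (quadro.drop M) (0 : Int)).length := by
        rw [PySem.List.length_enumerate]; exact ht
      have hx := h _ (List.getElem_mem hte)
      rw [PySem.List.getElem_enumerate] at hx
      simp only [bne_iff_ne, ne_eq] at hx
      rw [hband t, List.getD_eq_getElem _ _ ht] at *
      exact hx
    · intro h x hx
      obtain ⟨t, hte, rfl⟩ := List.mem_iff_getElem.mp hx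
      rw [PySem.List.getElem_enumerate]
      simp only [bne_iff_ne, ne_eq]
      rw [hband t]
      have ht : t < (quadro.drop M).length := by
        rw [PySem.List.length_enumerate] at hte; exact hte
      rw [← List.getD_eq_getElem _ _ ht]
      exact h t ht
  by_cases hA : (1 : Int) ∈ d.drop M
  · obtain ⟨t, ht, hv⟩ := hmem.mp hA
    rw [if_neg (not_not_intro hA), if_neg (fun hallT => (hall.mp hallT t ht) hv)]
  · rw [if_pos hA, if_pos (hall.mpr (fun t ht hv => hA (hmem.mpr ⟨t, ht, hv⟩)))]

-- ===== VERDICT (by name: the statement is the Claim_ definition above) =====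
theorem Ddet32_spec : Claim_equal_Ddet32 := by
  intro quadro _
  exact pv_main quadro
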